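-- pv_equiv track=rewrite | github.com/Spaceginner/zoder | modules/utils.py | create_ucnjzdr_image
-- ===== SOURCE A (Python) =====
-- def create_ucnjzdr_image(size_x: int, size_y: int, state: int = 0, default: bool = False):
--     max_state = 2 ** (size_x * size_y) - 1
--
--     if state > max_state:
--         raise ValueError(f'maximal value of the argument `state` with the an image size of {size_x}x{size_y} is {max_state} (total states: {max_state + 1})')
--
--     ucnjzdr_image = [[default for _ in range(size_x)] for _ in range(size_y)]
--
--     for _ in range(state):
--         ucnjzdr_image = iterate_ucnjzdr_image(ucnjzdr_image)
--
--     return ucnjzdr_image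
--
-- def iterate_ucnjzdr_image(ucnjzdr_image: list[list[bool]]):
--     is_exiting = False
--     for y in range(len(ucnjzdr_image)):
--         for x in range(len(ucnjzdr_image[0])):
--             if ucnjzdr_image[y][x]:
--                 ucnjzdr_image[y][x] = False
--             else:
--                 ucnjzdr_image[y][x] = True
--                 is_exiting = True
--                 break
--
--         if is_exiting:
--             break
--
--     return ucnjzdr_image
-- ===== SOURCE B (Python) =====
-- def create_ucnjzdr_image(size_x: int, size_y: int, state: int = 0, default: bool = False):
--     max_state = 2 ** (size_x * size_y) - 1
--
--     if state > max_state: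
--         raise ValueError(f'maximal value of the argument `state` with the an image size of {size_x}x{size_y} is {max_state} (total states: {max_state + 1})')
--
--     if size_x <= 0 or size_y <= 0:
--         return [[] for _ in range(size_y)]
--
--     # The grid is a binary counter (LSB at [0][0], row-major) advanced `state`
--     # increments from all-`default`, wrapping modulo 2**n; compute the final
--     # counter value directly and read each row off its binary representation.
--     value = ((max_state if default else 0) + max(state, 0)) % (max_state + 1)
--     bits = bin(value)[:1:-1]  # binary digits of value, least significant first
--
--     grid = []
--     for y in range(size_y):
--         seg = bits[y * size_x : y * size_x + size_x]
--         row = [c == '1' for c in seg]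
--         row.extend([False] * (size_x - len(seg)))
--         grid.append(row)
--     return grid
-- ===== Notes on version B (the rewrite author's own statement) =====
-- stated objective: faster
-- what changed: B computes the counter value (start + state) mod 2**n once and reads the rows off its binary representation, instead of A's state-fold of whole-grid binary-increment passes.
import Mathlib
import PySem

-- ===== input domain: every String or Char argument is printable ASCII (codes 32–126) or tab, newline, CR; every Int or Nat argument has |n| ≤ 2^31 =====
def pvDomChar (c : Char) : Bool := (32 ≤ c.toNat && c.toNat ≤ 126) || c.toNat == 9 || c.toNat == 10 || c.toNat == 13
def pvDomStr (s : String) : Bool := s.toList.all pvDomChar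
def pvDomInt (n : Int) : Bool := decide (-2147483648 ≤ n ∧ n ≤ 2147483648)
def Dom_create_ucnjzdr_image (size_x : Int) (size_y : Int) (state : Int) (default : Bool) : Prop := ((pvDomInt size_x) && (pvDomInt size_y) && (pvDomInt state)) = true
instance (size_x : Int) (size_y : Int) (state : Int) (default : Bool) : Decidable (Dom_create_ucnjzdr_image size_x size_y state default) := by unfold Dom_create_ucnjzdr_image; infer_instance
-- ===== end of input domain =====

-- B replaces A's `state`-fold of grid increments by computing the counter value
-- (start + state) mod 2^n once and filling each cell from its bit (objective: faster).


-- ===== PORT A =====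
-- inner `for x in range(len(grid[0]))` loop of iterate_ucnjzdr_image; on every grid A
-- builds, all rows have length len(grid[0]), so structural recursion on the row is the
-- same loop; the Bool is `is_exiting` (True once a False cell was set to True → break).
def pvFlipRow : List Bool → List Bool × Bool
  | [] => ([], false)
  | true :: rest =>
    let r := pvFlipRow rest
    (false :: r.1, r.2)
  | false :: rest => (true :: rest, true)

-- outer `for y in range(len(grid))` loop of iterate_ucnjzdr_image with the
-- `if is_exiting: break`.
def pvFlipGrid : List (List Bool) → List (List Bool)
  | [] => []
  | row :: rest =>
    let r := pvFlipRow row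
    if r.2 then r.1 :: rest else r.1 :: pvFlipGrid rest

-- Python's `state > 2 ** (size_x*size_y) - 1` (for size_x*size_y < 0 the power is a
-- float in (0,1), so an int `state` exceeds it iff 0 ≤ state); exact for int inputs.
-- for 0 ≤ n, `state > 2^n - 1` ↔ `0 < state ∧ n ≤ log2 state` (decided via the bit
-- length so the guard stays computable when n is astronomically large)
def pvRaises (size_x : Int) (size_y : Int) (state : Int) : Bool :=
  if 0 ≤ size_x * size_y then
    decide (0 < state) && decide ((size_x * size_y).toNat ≤ Nat.log2 state.toNat)
  else decide (0 ≤ state)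

def create_ucnjzdr_image (size_x : Int) (size_y : Int) (state : Int) (default : Bool) : List (List Bool) :=
  if pvRaises size_x size_y state then []  -- ValueError; excluded by Pre_
  else
    -- [[default for _ in range(size_x)] for _ in range(size_y)]
    let g0 := (List.range size_y.toNat).map (fun _ => (List.range size_x.toNat).map (fun _ => default))
    -- for _ in range(state): grid = iterate_ucnjzdr_image(grid)
    (List.range state.toNat).foldl (fun g _ => pvFlipGrid g) g0

-- ===== PORT B =====
-- value = ((max_state if default else 0) + max(state, 0)) % (max_state + 1)
def pvValue (size_x : Int) (size_y : Int) (state : Int) (default : Bool) : Int :=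
  ((if default then 2 ^ (size_x * size_y).toNat - 1 else 0) + max state 0)
    % 2 ^ (size_x * size_y).toNat

-- bits = bin(value)[:1:-1] (binary digits, least significant first; Nat.bits drops the
-- single '0' digit that bin(0) has — the rows' zero padding makes the output identical)
def pvBin (value : Int) : List Char :=
  value.toNat.bits.map (fun b => if b then '1' else '0')

-- one loop body: seg = bits[y*size_x : y*size_x+size_x];
-- row = [c == '1' for c in seg]; row.extend([False] * (size_x - len(seg)))
def pvRowB (bits : List Char) (sxN : Nat) (y : Nat) : List Bool :=
  ((bits.drop (y * sxN)).take sxN).map (fun c => c == '1')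
    ++ List.replicate (sxN - ((bits.drop (y * sxN)).take sxN).length) false

def create_ucnjzdr_image_alt (size_x : Int) (size_y : Int) (state : Int) (default : Bool) : List (List Bool) :=
  if pvRaises size_x size_y state then []  -- same ValueError as A; excluded by Pre_
  else if size_x ≤ 0 ∨ size_y ≤ 0 then
    (List.range size_y.toNat).map (fun _ => ([] : List Bool))
  else
    (List.range size_y.toNat).map (pvRowB (pvBin (pvValue size_x size_y state default)) size_x.toNat)

-- ===== PRECONDITION & SPEC =====
-- Pre_ excludes exactly the inputs where A raises ValueError (state above the maximal
-- counter value for the given grid size).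
def Pre_create_ucnjzdr_image (size_x : Int) (size_y : Int) (state : Int) (default : Bool) : Prop :=
  pvRaises size_x size_y state = false
instance (size_x : Int) (size_y : Int) (state : Int) (default : Bool) : Decidable (Pre_create_ucnjzdr_image size_x size_y state default) := by unfold Pre_create_ucnjzdr_image; infer_instance

def pvWitness_create_ucnjzdr_image : Int × Int × Int × Bool := (2, 2, 3, false)

def Spec_create_ucnjzdr_image (size_x : Int) (size_y : Int) (state : Int) (default : Bool) (out : List (List Bool)) : Prop := out = create_ucnjzdr_image_alt size_x size_y state default
instance (size_x : Int) (size_y : Int) (state : Int) (default : Bool) (out : List (List Bool)) : Decidable (Spec_create_ucnjzdr_image size_x size_y state default out) := by unfold Spec_create_ucnjzdr_image; infer_instance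

-- ===== CLAIM (what is proved, stated in full; the proofs are below) =====
def Claim_equal_create_ucnjzdr_image : Prop := ∀ (size_x : Int) (size_y : Int) (state : Int) (default : Bool), Dom_create_ucnjzdr_image size_x size_y state default → Pre_create_ucnjzdr_image size_x size_y state default → Spec_create_ucnjzdr_image size_x size_y state default (create_ucnjzdr_image size_x size_y state default)

-- ===== LEMMAS AND PROOFS =====

-- low `m` bits of `v`, least significant first
def pvBitsOf : Nat → Nat → List Bool
  | 0, _ => []
  | m + 1, v => decide (v % 2 = 1) :: pvBitsOf m (v / 2)

-- the grid holding the binary counter value `v` (row-major, LSB at [0][0])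
def pvGridOf (sx : Nat) : Nat → Nat → List (List Bool)
  | 0, _ => []
  | sy + 1, v => pvBitsOf sx v :: pvGridOf sx sy (v / 2 ^ sx)

theorem pvBitsOf_eq_map (m : Nat) : ∀ v : Nat, pvBitsOf m v = (List.range m).map v.testBit := by
  induction m with
  | zero => intro v; simp [pvBitsOf]
  | succ m ih =>
    intro v
    rw [List.range_succ_eq_map, List.map_cons, List.map_map]
    show pvBitsOf (m + 1) v = v.testBit 0 :: (List.range m).map (v.testBit ∘ Nat.succ)
    rw [pvBitsOf, ih (v / 2)]
    congr 1
    · rw [Nat.testBit_zero]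
    · apply List.map_congr_left; intro i _
      simp [Function.comp, Nat.testBit_succ]

theorem pvFlipRow_bits (m : Nat) : ∀ v : Nat,
    pvFlipRow (pvBitsOf m v) = (pvBitsOf m (v + 1), decide (v % 2 ^ m ≠ 2 ^ m - 1)) := by
  induction m with
  | zero => intro v; simp [pvBitsOf, pvFlipRow, Nat.mod_one]
  | succ m ih =>
    intro v
    have h2 : (2 : Nat) ^ (m + 1) = 2 * 2 ^ m := by ring
    have hpow : (0 : Nat) < 2 ^ m := Nat.two_pow_pos m
    have e1 : v % 2 ^ (m + 1) / 2 = v / 2 % 2 ^ m := by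
      rw [h2, Nat.mod_mul_right_div_self]
    have e2 : v % 2 ^ (m + 1) % 2 = v % 2 := Nat.mod_mod_of_dvd _ ⟨2 ^ m, h2⟩
    have hX : v % 2 ^ (m + 1) < 2 ^ (m + 1) := Nat.mod_lt _ (Nat.two_pow_pos _)
    have hlt : v / 2 % 2 ^ m < 2 ^ m := Nat.mod_lt _ hpow
    rcases Nat.mod_two_eq_zero_or_one v with h | h
    · -- even: first cell False → set True, exit
      have h1 : (v + 1) % 2 = 1 := by omega
      have hq : (v + 1) / 2 = v / 2 := by omega
      have h3 : v % 2 ^ (m + 1) ≠ 2 ^ (m + 1) - 1 := by omega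
      simp [pvBitsOf, h, h1, hq, pvFlipRow, h3]
    · -- odd: first cell True → clear it, carry into the rest of the row
      have h1 : (v + 1) % 2 = 0 := by omega
      have hq : (v + 1) / 2 = v / 2 + 1 := by omega
      have h3 : (v % 2 ^ (m + 1) = 2 ^ (m + 1) - 1) ↔ (v / 2 % 2 ^ m = 2 ^ m - 1) := by omega
      have h4 : (v % 2 ^ (m + 1) ≠ 2 ^ (m + 1) - 1) = (v / 2 % 2 ^ m ≠ 2 ^ m - 1) := by
        rw [eq_iff_iff]; exact not_congr h3
      simp only [pvBitsOf, h, h1, hq]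
      have hstep : pvFlipRow (decide True :: pvBitsOf m (v / 2)) =
          (false :: pvBitsOf m (v / 2 + 1), decide (v / 2 % 2 ^ m ≠ 2 ^ m - 1)) := by
        simp [pvFlipRow, ih (v / 2)]
      rw [hstep]
      simp only [Prod.mk.injEq]
      refine ⟨by simp, ?_⟩
      rw [decide_eq_decide]
      exact not_congr h3.symm

theorem pvFlipGrid_gridOf (sx : Nat) : ∀ (sy v : Nat),
    pvFlipGrid (pvGridOf sx sy v) = pvGridOf sx sy (v + 1) := by
  intro sy
  induction sy with
  | zero => intro v; simp [pvGridOf, pvFlipGrid]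
  | succ sy ih =>
    intro v
    have hpow : (0 : Nat) < 2 ^ sx := Nat.two_pow_pos sx
    obtain ⟨q, r, hr, rfl⟩ : ∃ q r, r < 2 ^ sx ∧ v = 2 ^ sx * q + r :=
      ⟨v / 2 ^ sx, v % 2 ^ sx, Nat.mod_lt _ hpow, (Nat.div_add_mod v (2 ^ sx)).symm⟩
    have hmodv : (2 ^ sx * q + r) % 2 ^ sx = r := by
      rw [Nat.mul_add_mod, Nat.mod_eq_of_lt hr]
    have hdivv : (2 ^ sx * q + r) / 2 ^ sx = q := by
      rw [Nat.mul_add_div hpow, Nat.div_eq_of_lt hr, Nat.add_zero]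
    simp only [pvGridOf, pvFlipGrid, pvFlipRow_bits, hmodv, hdivv]
    by_cases hc : r = 2 ^ sx - 1
    · -- row was all ones: rolls over and carries into the next rows
      subst hc
      have hv1 : 2 ^ sx * q + (2 ^ sx - 1) + 1 = 2 ^ sx * (q + 1) := by
        rw [Nat.mul_succ]; omega
      have hd : (2 ^ sx * q + (2 ^ sx - 1) + 1) / 2 ^ sx = q + 1 := by
        rw [hv1, Nat.mul_div_cancel_left _ hpow]
      simp [ih, hd]
    · have hv1 : 2 ^ sx * q + r + 1 = 2 ^ sx * q + (r + 1) := by omega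
      have hd : (2 ^ sx * q + r + 1) / 2 ^ sx = q := by
        rw [hv1, Nat.mul_add_div hpow, Nat.div_eq_of_lt (by omega), Nat.add_zero]
      simp [hc, hd]

theorem pvFold_gridOf (sx sy : Nat) : ∀ (k v : Nat),
    (List.range k).foldl (fun g _ => pvFlipGrid g) (pvGridOf sx sy v) = pvGridOf sx sy (v + k) := by
  intro k
  induction k with
  | zero => intro v; simp
  | succ k ih =>
    intro v
    rw [List.range_succ, List.foldl_append, ih, List.foldl_cons, List.foldl_nil,
      pvFlipGrid_gridOf]
    congr 1

theorem pvBitsOf_mod (m : Nat) : ∀ v : Nat, pvBitsOf m (v % 2 ^ m) = pvBitsOf m v := by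
  induction m with
  | zero => intro v; simp [pvBitsOf]
  | succ m ih =>
    intro v
    have h2 : (2 : Nat) ^ (m + 1) = 2 * 2 ^ m := by ring
    have hhead : v % 2 ^ (m + 1) % 2 = v % 2 := Nat.mod_mod_of_dvd _ ⟨2 ^ m, h2⟩
    have htail : v % 2 ^ (m + 1) / 2 = v / 2 % 2 ^ m := by
      rw [h2, Nat.mod_mul_right_div_self]
    simp [pvBitsOf, hhead, htail, ih]

theorem pvGridOf_mod (sx : Nat) : ∀ (sy v : Nat),
    pvGridOf sx sy (v % 2 ^ (sx * sy)) = pvGridOf sx sy v := by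
  intro sy
  induction sy with
  | zero => intro v; simp [pvGridOf]
  | succ sy ih =>
    intro v
    have hsplit : (2 : Nat) ^ (sx * (sy + 1)) = 2 ^ sx * 2 ^ (sx * sy) := by
      rw [← pow_add]; ring_nf
    have hhead : pvBitsOf sx (v % 2 ^ (sx * (sy + 1))) = pvBitsOf sx v := by
      rw [← pvBitsOf_mod sx (v % 2 ^ (sx * (sy + 1))),
        Nat.mod_mod_of_dvd _ ⟨2 ^ (sx * sy), hsplit⟩, pvBitsOf_mod]
    have htail : v % 2 ^ (sx * (sy + 1)) / 2 ^ sx = v / 2 ^ sx % 2 ^ (sx * sy) := by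
      rw [hsplit, Nat.mod_mul_right_div_self]
    simp [pvGridOf, hhead, htail, ih]

theorem pvGridOf_eq_map (sx : Nat) : ∀ (sy v : Nat),
    pvGridOf sx sy v = (List.range sy).map (fun y =>
      (List.range sx).map (fun x => v.testBit (y * sx + x))) := by
  intro sy
  induction sy with
  | zero => intro v; simp [pvGridOf]
  | succ sy ih =>
    intro v
    rw [List.range_succ_eq_map, List.map_cons, List.map_map]
    rw [pvGridOf, ih (v / 2 ^ sx)]
    congr 1
    · rw [pvBitsOf_eq_map]; apply List.map_congr_left; intro x _; simp
    · apply List.map_congr_left; intro y _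
      apply List.map_congr_left; intro x _
      simp only [Nat.testBit_div_two_pow]
      congr 1
      rw [Nat.succ_eq_add_one]
      ring

-- the all-`default` initial grid is the counter at value v0 (0, or all ones)
theorem pvInit_gridOf (sxN syN : Nat) (d : Bool) :
    (List.range syN).map (fun _ => (List.range sxN).map (fun _ => d))
      = pvGridOf sxN syN (if d then 2 ^ (sxN * syN) - 1 else 0) := by
  rw [pvGridOf_eq_map]
  apply List.map_congr_left; intro y hy
  apply List.map_congr_left; intro x hx
  rw [List.mem_range] at hy hx
  cases d with
  | false => simp
  | true =>
    have : y * sxN + x < sxN * syN := by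
      calc y * sxN + x < (y + 1) * sxN := by
              rw [Nat.add_mul, Nat.one_mul]; omega
        _ ≤ syN * sxN := Nat.mul_le_mul_right _ (by omega)
        _ = sxN * syN := Nat.mul_comm _ _
    simp [this]

-- bin/bits access: the i-th binary digit is the i-th bit
theorem pvBits_getD (i : Nat) : ∀ n : Nat, n.bits.getD i false = n.testBit i := by
  induction i with
  | zero =>
    intro n
    have hh : ∀ l : List Bool, l.getD 0 false = l.headI := by intro l; cases l <;> rfl
    rw [hh, ← Nat.bodd_eq_bits_head]
    have hm := Nat.mod_two_of_bodd n
    cases hb : n.bodd <;> rw [hb] at hm <;> simp [Nat.testBit_zero, hm]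
  | succ i ih =>
    intro n
    have ht : ∀ l : List Bool, l.getD (i + 1) false = l.tail.getD i false := by
      intro l; cases l <;> rfl
    rw [ht, ← Nat.div2_bits_eq_tail, ih, Nat.div2_val, Nat.testBit_succ]

theorem pvRowB_eq (w sxN y : Nat) :
    pvRowB (w.bits.map (fun b => if b then '1' else '0')) sxN y
      = (List.range sxN).map (fun x => w.testBit (y * sxN + x)) := by
  have hc1 : ∀ b : Bool, ((if b then '1' else '0') == '1') = b := by
    intro b; cases b <;> rfl
  apply List.ext_getElem
  · simp [pvRowB]
  · intro i h1 h2
    have hik : i < sxN := by simpa using h2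
    simp only [pvRowB, List.getElem_map, List.getElem_range]
    by_cases hseg : i < min sxN (w.bits.length - y * sxN)
    · rw [List.getElem_append_left (by simp; omega)]
      simp only [List.getElem_map, List.getElem_take, List.getElem_drop, hc1]
      rw [← List.getD_eq_getElem _ false (by omega), pvBits_getD]
    · rw [List.getElem_append_right (by simp; omega), List.getElem_replicate]
      have hsz : w < 2 ^ (y * sxN + i) := by
        have hs := (Nat.size_le (m := w) (n := y * sxN + i))
        rw [← Nat.size_eq_bits_len] at hs
        exact hs.mp (by omega)
      rw [Nat.testBit_eq_false_of_lt hsz]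

-- ===== VERDICT (by name: the statement is the Claim_ definition above) =====
theorem create_ucnjzdr_image_spec : Claim_equal_create_ucnjzdr_image := by
  intro sx sy st d _ hpre
  unfold Pre_create_ucnjzdr_image at hpre
  unfold Spec_create_ucnjzdr_image create_ucnjzdr_image create_ucnjzdr_image_alt
  simp only [hpre, Bool.false_eq_true, if_false]
  rw [pvInit_gridOf, pvFold_gridOf]
  by_cases h : sx ≤ 0 ∨ sy ≤ 0
  · -- degenerate grid: no cells at all
    rw [if_pos h, pvGridOf_eq_map]
    have h0 : sx.toNat = 0 ∨ sy.toNat = 0 := by omega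
    rcases h0 with h0 | h0 <;> simp [h0]
  · rw [if_neg h]
    have hx : 0 < sx := by omega
    have hy : 0 < sy := by omega
    have hnn : (sx * sy).toNat = sx.toNat * sy.toNat := by
      rw [← Int.toNat_of_nonneg hx.le, ← Int.toNat_of_nonneg hy.le, ← Int.natCast_mul,
        Int.toNat_natCast, Int.toNat_natCast, Int.toNat_natCast]
    have hval : pvValue sx sy st d
        = (((if d then 2 ^ (sx.toNat * sy.toNat) - 1 else 0) + st.toNat)
            % 2 ^ (sx.toNat * sy.toNat) : Nat) := by
      unfold pvValue
      rw [hnn, ← Int.toNat_eq_max]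
      cases d <;> push_cast [Nat.one_le_two_pow] <;> ring_nf
    have hw : (pvValue sx sy st d).toNat
        = ((if d then 2 ^ (sx.toNat * sy.toNat) - 1 else 0) + st.toNat)
            % 2 ^ (sx.toNat * sy.toNat) := by
      rw [hval, Int.toNat_natCast]
    rw [← pvGridOf_mod, pvGridOf_eq_map]
    apply List.map_congr_left
    intro yy _
    unfold pvBin
    rw [hw]
    exact (pvRowB_eq _ _ _).symm
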